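-- pv_equiv track=rewrite | github.com/milsi96/advent-of-code-2023 | day_11/main.py | get_all_ground_columns
-- ===== SOURCE A (Python) =====
-- def get_all_ground_columns(lines: list[str]) -> list[int]:
--     ground_columns: list[int] = []
--     transposed_lines = [
--         [lines[j][i] for j in range(len(lines))] for i in range(len(lines[0]))
--     ]
--     for i in range(len(transposed_lines)):
--         if all([ch == '.' for ch in transposed_lines[i]]):
--             ground_columns.append(i)
--     return ground_columns
-- ===== SOURCE B (Python) =====
-- def get_all_ground_columns(lines: list[str]) -> list[int]:
--     ncols = len(lines[0])
--     is_ground = [True] * ncols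
--     for row in lines:
--         for i in range(ncols):
--             if row[i] != '.':
--                 is_ground[i] = False
--     return [i for i in range(ncols) if is_ground[i]]
-- ===== Notes on version B (the rewrite author's own statement) =====
-- stated objective: alternative
-- what changed: B replaces A's materialized transpose plus per-column all-'.'-scans by a single row-major pass that maintains a per-column boolean array, then emits the indices still marked ground.
import Mathlib
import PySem

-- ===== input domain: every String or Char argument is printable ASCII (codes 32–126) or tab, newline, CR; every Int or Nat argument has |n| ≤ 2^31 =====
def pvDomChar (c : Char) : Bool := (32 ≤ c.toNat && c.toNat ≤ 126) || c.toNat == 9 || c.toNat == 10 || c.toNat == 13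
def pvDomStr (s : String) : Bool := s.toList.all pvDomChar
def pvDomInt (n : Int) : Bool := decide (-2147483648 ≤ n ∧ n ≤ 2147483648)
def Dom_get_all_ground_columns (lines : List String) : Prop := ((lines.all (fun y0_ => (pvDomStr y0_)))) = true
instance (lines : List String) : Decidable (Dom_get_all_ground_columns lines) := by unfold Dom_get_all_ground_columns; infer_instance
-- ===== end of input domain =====

-- B replaces A's materialized transpose + per-column scans by one row-major pass over
-- a per-column boolean state (objective: alternative decomposition, same asymptotic cost).

-- ===== PORT A =====
-- builds the transpose, then scans each column for all-'.'
def get_all_ground_columns (lines : List String) : List Int :=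
  let transposed : List (List Char) :=
    (List.range (lines.headD "").toList.length).map (fun i =>
      (List.range lines.length).map (fun j => ((lines.getD j "").toList).getD i ' '))
  (List.range transposed.length).foldl (fun acc i =>
    if (transposed.getD i []).all (fun ch => ch == '.') then acc ++ [(i : Int)] else acc) []

-- ===== PORT B =====
-- inner loop 'for i in range(ncols): if row[i] != '.': is_ground[i] = False'
def gcRowStep (ncols : Nat) (g : List Bool) (row : String) : List Bool :=
  (List.range ncols).foldl (fun g i =>
    if (row.toList.getD i ' ') != '.' then g.set i false else g) g

def get_all_ground_columns_alt (lines : List String) : List Int :=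
  let ncols := (lines.headD "").toList.length
  let isGround := lines.foldl (gcRowStep ncols) (List.replicate ncols true)
  ((List.range ncols).filter (fun i => isGround.getD i false)).map (fun i : Nat => (i : Int))

-- ===== PRECONDITION & SPEC =====
-- Pre_ excludes exactly the inputs where Python A raises IndexError: the empty list
-- (lines[0]) and grids where some row is shorter than the first row (lines[j][i]).
def Pre_get_all_ground_columns (lines : List String) : Prop :=
  lines ≠ [] ∧ ∀ s ∈ lines, (lines.headD "").toList.length ≤ s.toList.length
instance (lines : List String) : Decidable (Pre_get_all_ground_columns lines) := by
  unfold Pre_get_all_ground_columns; infer_instance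

def pvWitness_get_all_ground_columns : List String := ["#.", ".."]

def Spec_get_all_ground_columns (lines : List String) (out : List Int) : Prop := out = get_all_ground_columns_alt lines
instance (lines : List String) (out : List Int) : Decidable (Spec_get_all_ground_columns lines out) := by unfold Spec_get_all_ground_columns; infer_instance

-- ===== CLAIM (what is proved, stated in full; the proofs are below) =====
def Claim_equal_get_all_ground_columns : Prop := ∀ (lines : List String), Dom_get_all_ground_columns lines → Pre_get_all_ground_columns lines → Spec_get_all_ground_columns lines (get_all_ground_columns lines)

-- ===== LEMMAS AND PROOFS =====

-- setting index k to false makes position k read false (out of range reads the default false)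
lemma getD_set_false (g : List Bool) (k : Nat) :
    (g.set k false).getD k false = false := by
  by_cases h : k < g.length
  · simp [List.getD_eq_getElem?_getD, h]
  · simp [List.getD_eq_getElem?_getD,
      List.getElem?_eq_none (l := g.set k false) (by simpa using Nat.le_of_not_lt h)]

lemma getD_set_ne (g : List Bool) (i k : Nat) (h : k ≠ i) (v : Bool) :
    (g.set i v).getD k false = g.getD k false := by
  simp [List.getD_eq_getElem?_getD, List.getElem?_set_ne (fun hh => h hh.symm)]


-- the conditional-set fold, read at position k
lemma setfold_getD (p : Nat → Bool) (is : List Nat) (g : List Bool) (k : Nat) :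
    (is.foldl (fun g i => if p i then g.set i false else g) g).getD k false
      = if k ∈ is ∧ p k then false else g.getD k false := by
  induction is generalizing g with
  | nil => simp
  | cons i is ih =>
    simp only [List.foldl_cons, ih, List.mem_cons]
    by_cases hk : k ∈ is ∧ p k
    · simp [hk]
    · by_cases hki : k = i
      · subst hki
        by_cases hp : p k
        · have := getD_set_false g k
          simp only [List.getD_eq_getElem?_getD] at this
          simp [hp, this]
        · simp [hp]
      · by_cases hp : p i
        · have := getD_set_ne g i k hki false
          simp only [List.getD_eq_getElem?_getD] at this
          simp [hp, hk, hki, this]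
        · simp [hp, hk, hki]

-- one row of B's pass, read at a column k < ncols
lemma gcRowStep_getD (n : Nat) (g : List Bool) (row : String) (k : Nat) (hk : k < n) :
    (gcRowStep n g row).getD k false
      = (g.getD k false && (row.toList.getD k ' ' == '.')) := by
  unfold gcRowStep
  rw [setfold_getD (fun i => (row.toList.getD i ' ') != '.')]
  by_cases h : row.toList[k]?.getD ' ' = '.' <;>
    simp [h, hk, List.getD_eq_getElem?_getD, Bool.and_comm]

-- B's whole pass, read at a column k < n: true iff every row has '.' there (given the seed)
lemma gcFold_getD (lines : List String) (n : Nat) (g : List Bool) (k : Nat) (hk : k < n) :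
    (lines.foldl (gcRowStep n) g).getD k false
      = (g.getD k false && lines.all (fun row => row.toList.getD k ' ' == '.')) := by
  induction lines generalizing g with
  | nil => simp
  | cons r rs ih =>
    simp only [List.foldl_cons, ih, gcRowStep_getD n g r k hk, List.all_cons]
    rw [Bool.and_assoc]

-- indexing a range-comprehension
lemma getD_map_range {α : Type} (f : Nat → α) (n k : Nat) (d : α) (hk : k < n) :
    ((List.range n).map f).getD k d = f k := by
  simp [List.getD_eq_getElem?_getD, List.getElem?_map, List.getElem?_range hk]

-- scanning the j-indexed copy of a list equals scanning the list
lemma all_range_getD {α : Type} (xs : List α) (d : α) (q : α → Bool) :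
    ((List.range xs.length).all (fun j => q (xs.getD j d))) = xs.all q := by
  induction xs with
  | nil => simp
  | cons x xs ih =>
    rw [List.length_cons, List.range_succ_eq_map]
    simp only [List.all_cons, List.all_map, List.getD_cons_zero]
    simpa using congrArg (fun b => q x && b) ih

-- A's result, in closed form
lemma portA_closed (lines : List String) :
    get_all_ground_columns lines
      = ((List.range (lines.headD "").toList.length).filter
          (fun i => lines.all (fun s => s.toList.getD i ' ' == '.'))).map (fun i : Nat => (i : Int)) := by
  unfold get_all_ground_columns
  simp only [List.length_map, List.length_range]
  rw [PySem.List.foldl_append_if, List.nil_append]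
  have h : ∀ i ∈ List.range (lines.headD "").toList.length,
      (((List.range (lines.headD "").toList.length).map (fun i =>
          (List.range lines.length).map (fun j => ((lines.getD j "").toList).getD i ' '))).getD i []).all
        (fun ch => ch == '.')
      = lines.all (fun s => s.toList.getD i ' ' == '.') := by
    intro i hi
    rw [List.mem_range] at hi
    rw [getD_map_range _ _ _ _ hi, List.all_map]
    simpa [Function.comp] using all_range_getD lines "" (fun s => s.toList.getD i ' ' == '.')
  rw [List.filter_congr h]

-- B's result, in the same closed form
lemma portB_closed (lines : List String) :
    get_all_ground_columns_alt lines
      = ((List.range (lines.headD "").toList.length).filter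
          (fun i => lines.all (fun s => s.toList.getD i ' ' == '.'))).map (fun i : Nat => (i : Int)) := by
  simp only [get_all_ground_columns_alt]
  have h : ∀ i ∈ List.range (lines.headD "").toList.length,
      ((lines.foldl (gcRowStep (lines.headD "").toList.length)
          (List.replicate (lines.headD "").toList.length true)).getD i false)
      = lines.all (fun s => s.toList.getD i ' ' == '.') := by
    intro i hi
    rw [List.mem_range] at hi
    rw [gcFold_getD lines _ _ i hi, List.getD_eq_getElem?_getD]
    have hi' : i < (lines.head?.getD "").length := by simpa using hi
    simp [hi']
  rw [List.filter_congr h]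

-- ===== VERDICT (by name: the statement is the Claim_ definition above) =====
theorem get_all_ground_columns_spec : Claim_equal_get_all_ground_columns := by
  intro lines _ _
  unfold Spec_get_all_ground_columns
  rw [portA_closed, portB_closed]
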